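-- pv_equiv track=rewrite | github.com/sii-poland-testing-cc/aiBuddy | backend/app/agents/requirements_workflow.py | _deduplicate_context
-- ===== SOURCE A (Python) =====
-- from typing import Any, Dict, List, Optional
--
-- def _deduplicate_context(text: str, max_chars: int) -> str:
--     """Deduplicate paragraphs that appear in multiple RAG query results."""
--     seen: set = set()
--     parts: List[str] = []
--     total = 0
--
--     for para in text.split("\n\n"):
--         normalized = para.strip().lower()[:200]
--         if normalized and normalized not in seen:
--             seen.add(normalized)
--             if total + len(para) > max_chars:
--                 break
--             parts.append(para)
--             total += len(para)
--
--     return "\n\n".join(parts)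
-- ===== SOURCE B (Python) =====
-- def _deduplicate_context(text: str, max_chars: int) -> str:
--     """Two-pass version: first collect unique paragraphs, then apply the char budget."""
--     seen = set()
--     unique = []
--     for para in text.split("\n\n"):
--         normalized = para.strip().lower()[:200]
--         if normalized and normalized not in seen:
--             seen.add(normalized)
--             unique.append(para)
--     parts = []
--     total = 0
--     for para in unique:
--         if total + len(para) > max_chars:
--             break
--         parts.append(para)
--         total += len(para)
--     return "\n\n".join(parts)
-- ===== Notes on version B (the rewrite author's own statement) =====
-- stated objective: simpler
-- what changed: Splits A's single loop that interleaves dedup bookkeeping with the char-budget break into two independent passes: one builds the ordered list of unique paragraphs, the other truncates it to the budget.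
import Mathlib
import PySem

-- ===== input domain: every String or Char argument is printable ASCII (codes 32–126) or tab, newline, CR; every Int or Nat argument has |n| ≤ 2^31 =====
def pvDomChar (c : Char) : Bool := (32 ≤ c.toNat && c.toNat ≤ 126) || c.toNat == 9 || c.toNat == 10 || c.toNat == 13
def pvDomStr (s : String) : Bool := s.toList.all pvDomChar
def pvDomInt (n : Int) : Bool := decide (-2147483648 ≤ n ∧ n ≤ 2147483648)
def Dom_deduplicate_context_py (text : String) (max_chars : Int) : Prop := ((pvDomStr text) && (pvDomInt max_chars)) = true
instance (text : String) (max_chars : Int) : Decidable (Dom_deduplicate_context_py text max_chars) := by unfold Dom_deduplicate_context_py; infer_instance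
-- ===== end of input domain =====

-- B is a simpler decomposition of A (dedup pass, then budget pass); return value proved equal everywhere.

-- ===== PORT A =====
-- single loop: dedup bookkeeping and char-budget break interleaved, with early break
def pvALoop (ps : List String) (seen : PySem.Set String) (parts : List String)
    (total : Int) (mx : Int) : List String :=
  match ps with
  | [] => parts
  | p :: rest =>
    let normalized := PySem.Str.slice (PySem.Str.lower (PySem.Str.strip p)) none (some 200)
    if normalized ≠ "" ∧ ¬ PySem.Set.contains seen normalized then
      let seen' := PySem.Set.add seen normalized
      if total + PySem.Str.len p > mx then parts
      else pvALoop rest seen' (parts ++ [p]) (total + PySem.Str.len p) mx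
    else pvALoop rest seen parts total mx

def deduplicate_context_py (text : String) (max_chars : Int) : String :=
  PySem.Str.join "\n\n" (pvALoop (((PySem.Str.split? text "\n\n").getD [])) PySem.Set.empty [] 0 max_chars)

-- ===== PORT B =====
-- pass 1: ordered unique paragraphs
def pvUnique (ps : List String) (seen : PySem.Set String) : List String :=
  match ps with
  | [] => []
  | p :: rest =>
    let normalized := PySem.Str.slice (PySem.Str.lower (PySem.Str.strip p)) none (some 200)
    if normalized ≠ "" ∧ ¬ PySem.Set.contains seen normalized then
      p :: pvUnique rest (PySem.Set.add seen normalized)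
    else pvUnique rest seen

-- pass 2: take a prefix fitting the char budget
def pvBudget (ps : List String) (total : Int) (mx : Int) : List String :=
  match ps with
  | [] => []
  | p :: rest =>
    if total + PySem.Str.len p > mx then []
    else p :: pvBudget rest (total + PySem.Str.len p) mx

def deduplicate_context_py_alt (text : String) (max_chars : Int) : String :=
  PySem.Str.join "\n\n" (pvBudget (pvUnique (((PySem.Str.split? text "\n\n").getD [])) PySem.Set.empty) 0 max_chars)

-- ===== PRECONDITION & SPEC =====
def Spec_deduplicate_context_py (text : String) (max_chars : Int) (out : String) : Prop := out = deduplicate_context_py_alt text max_chars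
instance (text : String) (max_chars : Int) (out : String) : Decidable (Spec_deduplicate_context_py text max_chars out) := by unfold Spec_deduplicate_context_py; infer_instance

-- ===== CLAIM (what is proved, stated in full; the proofs are below) =====
def Claim_equal_deduplicate_context_py : Prop := ∀ (text : String) (max_chars : Int), Dom_deduplicate_context_py text max_chars → Spec_deduplicate_context_py text max_chars (deduplicate_context_py text max_chars)

-- ===== LEMMAS AND PROOFS =====

theorem pvALoop_eq (ps : List String) (seen : PySem.Set String) (parts : List String)
    (total mx : Int) :
    pvALoop ps seen parts total mx = parts ++ pvBudget (pvUnique ps seen) total mx := by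
  induction ps generalizing seen parts total with
  | nil => simp [pvALoop, pvUnique, pvBudget]
  | cons p rest ih =>
    simp only [pvALoop, pvUnique]
    split
    · simp only [pvBudget]
      split
      · simp
      · rw [ih]; simp
    · exact ih _ _ _

-- ===== VERDICT (by name: the statement is the Claim_ definition above) =====
theorem deduplicate_context_py_spec : Claim_equal_deduplicate_context_py := by
  intro text max_chars _
  unfold Spec_deduplicate_context_py deduplicate_context_py deduplicate_context_py_alt
  rw [pvALoop_eq]
  simp
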